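-- pv_equiv track=rewrite | github.com/sangjun19/CodingTest | 신입사원 교육.py | solution
-- ===== SOURCE A (Python) =====
-- import heapq
--
-- def solution(ability, number):
--     heapq.heapify(ability)
--
--     for i in range(number):
--         x = heapq.heappop(ability)
--         y = heapq.heappop(ability)
--         heapq.heappush(ability, x + y)
--         heapq.heappush(ability, x + y)
--
--     return sum(ability)
-- ===== SOURCE B (Python) =====
-- def _insert(sorted_list, v):
--     # insert v into an ascending list, after all elements <= v
--     i = 0
--     while i < len(sorted_list) and sorted_list[i] <= v:
--         i += 1
--     return sorted_list[:i] + [v] + sorted_list[i:]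
--
-- def solution(ability, number):
--     arr = sorted(ability)
--     for _ in range(number):
--         x, y = arr[0], arr[1]
--         s = x + y
--         arr = _insert(_insert(arr[2:], s), s)
--     return sum(arr)
-- ===== Notes on version B (the rewrite author's own statement) =====
-- stated objective: alternative
-- what changed: Replaces heapq binary-heap maintenance with a once-sorted list: each round takes the two front (smallest) elements and reinserts their sum twice by ordered insertion, then sums the list; B does not mutate the argument.
import Mathlib
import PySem

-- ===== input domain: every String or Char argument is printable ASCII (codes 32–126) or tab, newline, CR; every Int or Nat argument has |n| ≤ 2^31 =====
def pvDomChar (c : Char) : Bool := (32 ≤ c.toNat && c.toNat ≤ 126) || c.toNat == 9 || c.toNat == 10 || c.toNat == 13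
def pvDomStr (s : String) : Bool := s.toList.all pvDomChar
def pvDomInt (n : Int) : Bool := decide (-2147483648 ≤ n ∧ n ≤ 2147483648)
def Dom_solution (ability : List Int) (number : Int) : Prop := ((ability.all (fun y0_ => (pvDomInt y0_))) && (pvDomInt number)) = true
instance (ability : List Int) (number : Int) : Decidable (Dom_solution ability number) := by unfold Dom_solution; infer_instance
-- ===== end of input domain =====

-- B keeps a sorted list with ordered insertion instead of A's heapq min-heap (alternative
-- decomposition, same greedy merges); A mutates `ability` in place (heapify) while B does not:
-- the equivalence proved here is about the RETURN value only.

-- ===== PORT A =====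
-- A calls the stdlib priority queue heapq; those library calls are ported as a verified
-- min-heap (merge-based) with the same heapify/heappop/heappush semantics on the values.
inductive Heap where
  | nil : Heap
  | node : Int → Heap → Heap → Heap
deriving DecidableEq, Repr

def Heap.size : Heap → Nat
  | .nil => 0
  | .node _ l r => l.size + r.size + 1

-- structural merge with an exact fuel bound (fuel only makes the recursion structural;
-- with fuel = size a + size b it never runs out)
def Heap.mergeF : Nat → Heap → Heap → Heap
  | _, .nil, h => h
  | _, h, .nil => h
  | 0, h, _ => h
  | f+1, .node a l1 r1, .node b l2 r2 =>
    if a ≤ b then .node a (Heap.mergeF f r1 (.node b l2 r2)) l1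
    else .node b (Heap.mergeF f (.node a l1 r1) r2) l2

def Heap.merge (a b : Heap) : Heap := Heap.mergeF (a.size + b.size) a b

-- heappush
def Heap.push (h : Heap) (v : Int) : Heap := h.merge (.node v .nil .nil)

-- heappop; heappop raises IndexError on an empty heap, excluded by Pre_solution
def Heap.pop : Heap → Int × Heap
  | .nil => (0, .nil)
  | .node v l r => (v, l.merge r)

-- heapify
def Heap.ofList (l : List Int) : Heap := l.foldl Heap.push .nil

def Heap.sum : Heap → Int
  | .nil => 0
  | .node v l r => v + l.sum + r.sum

-- the `for i in range(number)` loop of A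
def heapRounds : Nat → Heap → Heap
  | 0, h => h
  | n+1, h =>
    let p1 := h.pop
    let p2 := p1.2.pop
    heapRounds n ((p2.2.push (p1.1 + p2.1)).push (p1.1 + p2.1))

def solution (ability : List Int) (number : Int) : Int :=
  (heapRounds number.toNat (Heap.ofList ability)).sum

-- ===== PORT B =====
-- Source B's hand-written `_insert`: insert v after all elements ≤ v of an ascending list
def insertAsc : List Int → Int → List Int
  | [], v => [v]
  | a :: rest, v => if a ≤ v then a :: insertAsc rest v else v :: a :: rest

-- the `for _ in range(number)` loop of B; arr[0]/arr[1] raise IndexError when the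
-- list has fewer than two elements, excluded by Pre_solution
def altRounds : Nat → List Int → List Int
  | 0, arr => arr
  | n+1, arr =>
    match arr with
    | x :: y :: rest => altRounds n (insertAsc (insertAsc rest (x + y)) (x + y))
    | _ => arr

def solution_alt (ability : List Int) (number : Int) : Int :=
  (altRounds number.toNat (PySem.List.sorted ability (fun x => x) false)).sum

-- ===== PRECONDITION & SPEC =====
-- Pre_ excludes exactly the inputs where A raises IndexError: a positive number of
-- rounds with fewer than two recruits (both heappops need an element; the loop keeps
-- the length constant afterwards).
def Pre_solution (ability : List Int) (number : Int) : Prop :=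
  number ≤ 0 ∨ 2 ≤ ability.length
instance (ability : List Int) (number : Int) : Decidable (Pre_solution ability number) := by unfold Pre_solution; infer_instance

def pvWitness_solution : List Int × Int := ([3, 1, 2], 2)

def Spec_solution (ability : List Int) (number : Int) (out : Int) : Prop := out = solution_alt ability number
instance (ability : List Int) (number : Int) (out : Int) : Decidable (Spec_solution ability number out) := by unfold Spec_solution; infer_instance

-- ===== CLAIM (what is proved, stated in full; the proofs are below) =====
def Claim_equal_solution : Prop := ∀ (ability : List Int) (number : Int), Dom_solution ability number → Pre_solution ability number → Spec_solution ability number (solution ability number)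

-- ===== LEMMAS AND PROOFS =====

def Heap.toMS : Heap → Multiset Int
  | .nil => 0
  | .node v l r => v ::ₘ (l.toMS + r.toMS)

theorem Heap.toMS_mergeF : ∀ (f : Nat) (a b : Heap), a.size + b.size ≤ f →
    (Heap.mergeF f a b).toMS = a.toMS + b.toMS := by
  intro f
  induction f with
  | zero =>
      intro a b h
      cases a with
      | nil => simp [Heap.mergeF, Heap.toMS]
      | node a1 l1 r1 =>
          cases b with
          | nil => simp [Heap.mergeF, Heap.toMS]
          | node b1 l2 r2 => simp [Heap.size] at h
  | succ f ih =>
      intro a b h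
      cases a with
      | nil => simp [Heap.mergeF, Heap.toMS]
      | node a1 l1 r1 =>
          cases b with
          | nil => simp [Heap.mergeF, Heap.toMS]
          | node b1 l2 r2 =>
              simp only [Heap.size] at h
              simp only [Heap.mergeF]
              split
              · rw [Heap.toMS, ih r1 (.node b1 l2 r2) (by simp [Heap.size]; omega)]
                simp only [Heap.toMS, ← Multiset.singleton_add]
                abel
              · rw [Heap.toMS, ih (.node a1 l1 r1) r2 (by simp [Heap.size]; omega)]
                simp only [Heap.toMS, ← Multiset.singleton_add]
                abel

theorem Heap.toMS_merge (a b : Heap) : (a.merge b).toMS = a.toMS + b.toMS :=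
  Heap.toMS_mergeF (a.size + b.size) a b le_rfl

theorem Heap.toMS_push (h : Heap) (v : Int) : (h.push v).toMS = v ::ₘ h.toMS := by
  simp only [Heap.push, Heap.toMS_merge, Heap.toMS, ← Multiset.singleton_add]
  abel

theorem Heap.sum_eq (h : Heap) : h.sum = h.toMS.sum := by
  induction h with
  | nil => simp [Heap.sum, Heap.toMS]
  | node v l r ihl ihr => simp [Heap.sum, Heap.toMS, ihl, ihr]; ring

theorem Heap.toMS_foldl_push (l : List Int) (h : Heap) :
    (l.foldl Heap.push h).toMS = h.toMS + ↑l := by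
  induction l generalizing h with
  | nil => simp
  | cons a t ih =>
      simp only [List.foldl_cons, ih, Heap.toMS_push, ← Multiset.singleton_add,
        ← Multiset.cons_coe]
      abel

theorem Heap.toMS_ofList (l : List Int) : (Heap.ofList l).toMS = ↑l := by
  simp [Heap.ofList, Heap.toMS_foldl_push, Heap.toMS]

inductive Heap.IsHeap : Heap → Prop
  | nil : Heap.IsHeap .nil
  | node (v : Int) (l r : Heap) :
      (∀ x ∈ l.toMS, v ≤ x) → (∀ x ∈ r.toMS, v ≤ x) →
      l.IsHeap → r.IsHeap → (Heap.node v l r).IsHeap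

theorem Heap.root_le {v : Int} {l r : Heap} (h : (Heap.node v l r).IsHeap) :
    ∀ x ∈ (Heap.node v l r).toMS, v ≤ x := by
  cases h with
  | node _ _ _ hl hr _ _ =>
      intro x hx
      simp only [Heap.toMS, Multiset.mem_cons, Multiset.mem_add] at hx
      rcases hx with rfl | hx | hx
      · exact le_refl x
      · exact hl x hx
      · exact hr x hx

theorem Heap.isHeap_mergeF : ∀ (f : Nat) (a b : Heap), a.size + b.size ≤ f →
    a.IsHeap → b.IsHeap → (Heap.mergeF f a b).IsHeap := by
  intro f
  induction f with
  | zero =>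
      intro a b h ha hb
      cases a with
      | nil => simpa [Heap.mergeF] using hb
      | node a1 l1 r1 =>
          cases b with
          | nil => simpa [Heap.mergeF] using ha
          | node b1 l2 r2 => simp [Heap.size] at h
  | succ f ih =>
      intro a b h ha hb
      cases a with
      | nil => simpa [Heap.mergeF] using hb
      | node a1 l1 r1 =>
          cases b with
          | nil => simpa [Heap.mergeF] using ha
          | node b1 l2 r2 =>
              simp only [Heap.size] at h
              simp only [Heap.mergeF]
              split
              · rename_i hab
                cases ha with
                | node _ _ _ hl1 hr1 ihl1 ihr1 =>
                    refine Heap.IsHeap.node _ _ _ ?_ hl1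
                      (ih r1 (.node b1 l2 r2) (by simp [Heap.size]; omega) ihr1 hb) ihl1
                    intro x hx
                    rw [Heap.toMS_mergeF f r1 (.node b1 l2 r2) (by simp [Heap.size]; omega)] at hx
                    rcases Multiset.mem_add.mp hx with hx | hx
                    · exact hr1 x hx
                    · exact le_trans hab (Heap.root_le hb x hx)
              · rename_i hab
                cases hb with
                | node _ _ _ hl2 hr2 ihl2 ihr2 =>
                    refine Heap.IsHeap.node _ _ _ ?_ hl2
                      (ih (.node a1 l1 r1) r2 (by simp [Heap.size]; omega) ha ihr2) ihl2
                    intro x hx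
                    rw [Heap.toMS_mergeF f (.node a1 l1 r1) r2 (by simp [Heap.size]; omega)] at hx
                    rcases Multiset.mem_add.mp hx with hx | hx
                    · exact le_trans ((not_le.mp hab).le) (Heap.root_le ha x hx)
                    · exact hr2 x hx

theorem Heap.isHeap_merge {a b : Heap} (ha : a.IsHeap) (hb : b.IsHeap) :
    (a.merge b).IsHeap :=
  Heap.isHeap_mergeF (a.size + b.size) a b le_rfl ha hb

theorem Heap.isHeap_push {h : Heap} (hh : h.IsHeap) (v : Int) : (h.push v).IsHeap := by
  refine Heap.isHeap_merge hh ?_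
  refine Heap.IsHeap.node _ _ _ ?_ ?_ Heap.IsHeap.nil Heap.IsHeap.nil <;>
    intro x hx <;> simp [Heap.toMS] at hx

theorem Heap.isHeap_ofList (l : List Int) : (Heap.ofList l).IsHeap := by
  unfold Heap.ofList
  have : ∀ (l : List Int) (h : Heap), h.IsHeap → (l.foldl Heap.push h).IsHeap := by
    intro l
    induction l with
    | nil => intro h hh; exact hh
    | cons a t ih => intro h hh; exact ih _ (Heap.isHeap_push hh a)
  exact this l .nil Heap.IsHeap.nil

theorem insertAsc_coe (l : List Int) (v : Int) :
    (↑(insertAsc l v) : Multiset Int) = v ::ₘ ↑l := by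
  induction l with
  | nil => simp [insertAsc]
  | cons a t ih =>
      simp only [insertAsc]
      split
      · simp only [← Multiset.cons_coe, ih, Multiset.cons_swap]
      · simp [← Multiset.cons_coe]

theorem mem_insertAsc {x v : Int} {l : List Int} (hx : x ∈ insertAsc l v) :
    x = v ∨ x ∈ l := by
  have : x ∈ (↑(insertAsc l v) : Multiset Int) := Multiset.mem_coe.mpr hx
  rw [insertAsc_coe] at this
  rcases Multiset.mem_cons.mp this with h | h
  · exact Or.inl h
  · exact Or.inr (Multiset.mem_coe.mp h)

theorem insertAsc_sorted {l : List Int} (hl : l.Pairwise (· ≤ ·)) (v : Int) :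
    (insertAsc l v).Pairwise (· ≤ ·) := by
  induction l with
  | nil => simp [insertAsc]
  | cons a t ih =>
      rcases List.pairwise_cons.mp hl with ⟨ha, ht⟩
      simp only [insertAsc]
      split
      · refine List.pairwise_cons.mpr ⟨?_, ih ht⟩
        intro x hx
        rcases mem_insertAsc hx with rfl | hx
        · assumption
        · exact ha x hx
      · rename_i hav
        refine List.pairwise_cons.mpr ⟨?_, hl⟩
        intro x hx
        rcases List.mem_cons.mp hx with rfl | hx
        · exact (not_le.mp hav).le
        · exact le_trans ((not_le.mp hav).le) (ha x hx)

theorem insertAsc_length (l : List Int) (v : Int) :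
    (insertAsc l v).length = l.length + 1 := by
  induction l with
  | nil => simp [insertAsc]
  | cons a t ih => simp only [insertAsc]; split <;> simp [ih]

theorem sorted_head_le {x : Int} {t : List Int} (h : (x :: t).Pairwise (· ≤ ·)) :
    ∀ z ∈ x :: t, x ≤ z := by
  intro z hz
  rcases List.mem_cons.mp hz with rfl | hz
  · exact le_refl z
  · exact (List.pairwise_cons.mp h).1 z hz

-- loop invariant: a heap and a sorted list with the same multiset stay in lockstep
theorem rounds_eq (n : Nat) (h : Heap) (arr : List Int)
    (hh : h.IsHeap) (hs : arr.Pairwise (· ≤ ·)) (hm : h.toMS = ↑arr)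
    (hlen : n = 0 ∨ 2 ≤ arr.length) :
    (heapRounds n h).toMS = ↑(altRounds n arr) := by
  induction n generalizing h arr with
  | zero => simpa [heapRounds, altRounds]
  | succ n ih =>
      rcases hlen with hlen | hlen
      · omega
      match arr, hlen with
      | x :: y :: rest, _ =>
        -- h is a node whose root is x (both are the minimum of the shared multiset)
        cases h with
        | nil => simp [Heap.toMS, ← Multiset.cons_coe] at hm
        | node v l r =>
          have hvx : v = x := by
            have hx_mem : x ∈ (Heap.node v l r).toMS := by
              rw [hm]; simp
            have hv_mem : v ∈ x :: y :: rest := by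
              have : v ∈ (Heap.node v l r).toMS := by simp [Heap.toMS]
              rw [hm] at this; exact Multiset.mem_coe.mp this
            exact le_antisymm (Heap.root_le hh x hx_mem) (sorted_head_le hs v hv_mem)
          subst hvx
          have hrest : (l.merge r).toMS = ↑(y :: rest) := by
            have : (Heap.node v l r).toMS = v ::ₘ ↑(y :: rest) := by
              rw [hm]; simp [← Multiset.cons_coe]
            rw [Heap.toMS] at this
            rw [Heap.toMS_merge]
            exact (Multiset.cons_inj_right v).mp this
          have hh1 : (l.merge r).IsHeap := by
            cases hh with
            | node _ _ _ _ _ hl hr => exact Heap.isHeap_merge hl hr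
          have hs1 : (y :: rest).Pairwise (· ≤ ·) := (List.pairwise_cons.mp hs).2
          -- second pop: the root of the merged heap is y
          rcases hmr : l.merge r with _ | ⟨w, p, q⟩
          · rw [hmr] at hrest; simp [Heap.toMS, ← Multiset.cons_coe] at hrest
          · rw [hmr] at hrest hh1
            have hwy : w = y := by
              have hy_mem : y ∈ (Heap.node w p q).toMS := by rw [hrest]; simp
              have hw_mem : w ∈ y :: rest := by
                have : w ∈ (Heap.node w p q).toMS := by simp [Heap.toMS]
                rw [hrest] at this; exact Multiset.mem_coe.mp this
              exact le_antisymm (Heap.root_le hh1 y hy_mem) (sorted_head_le hs1 w hw_mem)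
            subst hwy
            have hrest2 : (p.merge q).toMS = ↑rest := by
              have : (Heap.node w p q).toMS = w ::ₘ ↑rest := by
                rw [hrest]; simp [← Multiset.cons_coe]
              rw [Heap.toMS] at this
              rw [Heap.toMS_merge]
              exact (Multiset.cons_inj_right w).mp this
            have hh2 : (p.merge q).IsHeap := by
              cases hh1 with
              | node _ _ _ _ _ hp hq => exact Heap.isHeap_merge hp hq
            -- unfold one round on each side
            have hA : heapRounds (n+1) (Heap.node v l r) =
                heapRounds n ((((p.merge q).push (v + w)).push (v + w))) := by
              simp [heapRounds, Heap.pop, hmr]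
            have hB : altRounds (n+1) (v :: w :: rest) =
                altRounds n (insertAsc (insertAsc rest (v + w)) (v + w)) := rfl
            rw [hA, hB]
            refine ih _ _ ?_ ?_ ?_ ?_
            · exact Heap.isHeap_push (Heap.isHeap_push hh2 _) _
            · exact insertAsc_sorted (insertAsc_sorted ((List.pairwise_cons.mp hs1).2) _) _
            · rw [Heap.toMS_push, Heap.toMS_push, hrest2, insertAsc_coe, insertAsc_coe]
            · right
              rw [insertAsc_length, insertAsc_length]
              omega

-- ===== VERDICT (by name: the statement is the Claim_ definition above) =====
theorem solution_spec : Claim_equal_solution := by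
  intro ability number _ hpre
  unfold Spec_solution solution solution_alt
  set arr := PySem.List.sorted ability (fun x => x) false with harr
  have hperm : arr.Perm ability := PySem.List.sorted_perm ability (fun x => x) false
  have hms : (Heap.ofList ability).toMS = ↑arr := by
    rw [Heap.toMS_ofList]
    exact (Multiset.coe_eq_coe.mpr hperm).symm
  have hsorted : arr.Pairwise (· ≤ ·) :=
    PySem.List.sorted_pairwise ability (fun x => x)
  have hlen : number.toNat = 0 ∨ 2 ≤ arr.length := by
    rcases hpre with hle | hlen
    · left; omega
    · right; rw [hperm.length_eq]; exact hlen
  have := rounds_eq number.toNat (Heap.ofList ability) arr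
    (Heap.isHeap_ofList ability) hsorted hms hlen
  rw [Heap.sum_eq, this, Multiset.sum_coe]
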